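-- pv_equiv track=rewrite | github.com/subconscious-systems/slime | slime/utils/json_utils.py | compact_json_string
-- ===== SOURCE A (Python) =====
-- def compact_json_string(pretty_json: str) -> str:
--     """Convert pretty-printed JSON to single-line JSON.
--
--     Handles incomplete/partial JSON strings gracefully by processing character-by-character.
--     Removes newlines and indentation while preserving:
--     - Whitespace inside string literals
--     - Escape sequences
--     - Single space after colons and commas (for readability)
--
--     Args:
--         pretty_json: A JSON string that may contain newlines and indentation.
--                     Can be incomplete/partial JSON.
--
--     Returns:
--         Single-line JSON string with spaces after colons and commas.
--
--     Examples:
--         >>> compact_json_string('{"key": "value"}')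
--         '{"key": "value"}'
--         >>> compact_json_string('{\\n  "key": "value"\\n}')
--         '{"key": "value"}'
--         >>> compact_json_string('{"key": "value with  spaces"}')
--         '{"key": "value with  spaces"}'
--         >>> compact_json_string('{"incomplete": "json')  # Partial JSON
--         '{"incomplete": "json'
--     """
--     if not pretty_json:
--         return pretty_json
--
--     result = []
--     i = 0
--     n = len(pretty_json)
--     in_string = False
--     need_space = False  # Track if we need to add a space before the next non-whitespace char
--
--     while i < n:
--         char = pretty_json[i]
--
--         if in_string:
--             # Inside a string literal - preserve everything
--             result.append(char)
--             if char == '\\' and i + 1 < n: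
--                 # Escape sequence - include next char as-is
--                 i += 1
--                 result.append(pretty_json[i])
--             elif char == '"':
--                 # End of string
--                 in_string = False
--         else:
--             # Outside string literal
--             if char == '"':
--                 # Start of string - add pending space if needed
--                 if need_space:
--                     result.append(' ')
--                     need_space = False
--                 in_string = True
--                 result.append(char)
--             elif char in ' \t\n\r':
--                 # Skip whitespace outside strings
--                 # Space will be added via need_space flag when we see next char
--                 pass
--             elif char in ':,':
--                 # Colon and comma - output them and mark that we need space after
--                 result.append(char)
--                 need_space = True
--             elif char in '}]':
--                 # Closing brackets - no space needed before them
--                 need_space = False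
--                 result.append(char)
--             else:
--                 # Other characters (digits, true, false, null, opening brackets)
--                 if need_space:
--                     result.append(' ')
--                     need_space = False
--                 result.append(char)
--
--         i += 1
--
--     return ''.join(result)
-- ===== SOURCE B (Python) =====
-- def _segments(s):
--     """Split s into alternating (is_string, text) segments; string segments
--     start at a '"' and run through the matching unescaped closing quote
--     (or to the end if unterminated)."""
--     segs = []
--     i, n = 0, len(s)
--     while i < n:
--         if s[i] == '"':
--             j = i + 1
--             while j < n and s[j] != '"':
--                 j += 2 if (s[j] == '\\' and j + 1 < n) else 1
--             j = min(j + 1, n)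
--             segs.append((True, s[i:j]))
--         else:
--             j = i
--             while j < n and s[j] != '"':
--                 j += 1
--             segs.append((False, s[i:j]))
--         i = j
--     return segs
--
--
-- def compact_json_string(pretty_json: str) -> str:
--     """Convert pretty-printed JSON to single-line JSON (tokenize, then render)."""
--     out = []
--     need_space = False
--     for is_str, seg in _segments(pretty_json):
--         if is_str:
--             if need_space:
--                 out.append(' ')
--             need_space = False
--             out.append(seg)
--         else:
--             for ch in seg:
--                 if ch in ' \t\n\r':
--                     continue
--                 if ch in ':,':
--                     out.append(ch)
--                     need_space = True
--                 elif ch in '}]':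
--                     need_space = False
--                     out.append(ch)
--                 else:
--                     if need_space:
--                         out.append(' ')
--                         need_space = False
--                     out.append(ch)
--     return ''.join(out)
-- ===== Notes on version B (the rewrite author's own statement) =====
-- stated objective: alternative
-- what changed: A interleaves string-literal tracking and whitespace compaction in one character loop with in_string/need_space flags; B first tokenizes the input into alternating string-literal and plain segments, then renders each segment (string segments verbatim, plain segments whitespace-stripped with the need_space flag threaded across segments).
import Mathlib
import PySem

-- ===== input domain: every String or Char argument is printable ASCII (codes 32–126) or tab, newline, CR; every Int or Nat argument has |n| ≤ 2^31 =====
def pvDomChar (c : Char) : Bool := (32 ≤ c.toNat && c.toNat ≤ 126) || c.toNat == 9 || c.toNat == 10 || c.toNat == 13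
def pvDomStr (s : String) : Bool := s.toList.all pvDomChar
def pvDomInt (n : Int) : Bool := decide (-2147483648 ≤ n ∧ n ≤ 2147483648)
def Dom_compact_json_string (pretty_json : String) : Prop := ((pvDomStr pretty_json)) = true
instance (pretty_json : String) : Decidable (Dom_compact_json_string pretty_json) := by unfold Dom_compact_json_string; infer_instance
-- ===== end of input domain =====

-- B replaces A's single interleaved character loop by a two-phase decomposition
-- (tokenize into string-literal / plain segments, then render each segment); same cost, clearer structure.

-- ===== PORT A =====
-- A's single while-loop over characters with in_string / need_space state, transliterated
-- (result.append … ''.join becomes a forward-built List Char).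
def compactA : List Char → Bool → Bool → List Char
  | [], _, _ => []
  | c :: rest, inStr, ns =>
    if inStr then
      if c = '\\' then
        -- "char == '\\' and i + 1 < n": consume the next char as-is when it exists
        match rest with
        | d :: rest' => c :: d :: compactA rest' true ns
        | [] => [c]
      else if c = '"' then c :: compactA rest false ns
      else c :: compactA rest true ns
    else
      if c = '"' then (if ns then [' '] else []) ++ c :: compactA rest true false
      else if c = ' ' ∨ c = '\t' ∨ c = '\n' ∨ c = '\r' then compactA rest false ns
      else if c = ':' ∨ c = ',' then c :: compactA rest false true
      else if c = '}' ∨ c = ']' then c :: compactA rest false false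
      else (if ns then [' '] else []) ++ c :: compactA rest false false

def compact_json_string (pretty_json : String) : String :=
  if pretty_json = "" then pretty_json
  else String.ofList (compactA pretty_json.toList false false)

-- ===== PORT B =====
-- B's tokenizer: rest of a string literal after the opening quote, through the closing quote
-- (returns the consumed segment and the remainder).
def scanStr : List Char → List Char × List Char
  | [] => ([], [])
  | c :: rest =>
    if c = '"' then ([c], rest)
    else if c = '\\' then
      match rest with
      | d :: rest' => let p := scanStr rest'; (c :: d :: p.1, p.2)
      | [] => ([c], [])
    else let p := scanStr rest; (c :: p.1, p.2)

-- B's tokenizer: plain text up to the next double quote.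
def scanPlain : List Char → List Char × List Char
  | [] => ([], [])
  | c :: rest =>
    if c = '"' then ([], c :: rest)
    else let p := scanPlain rest; (c :: p.1, p.2)

theorem scanStr_rest_le : ∀ (l : List Char), (scanStr l).2.length ≤ l.length := by
  intro l
  induction l using scanStr.induct with
  | case1 => simp [scanStr]
  | case2 rest => rw [scanStr.eq_def]; simp
  | case3 d rest' h ih =>
      rw [scanStr]; simp only []
      simp; omega
  | case4 h => rw [scanStr]; simp
  | case5 c rest h1 h2 ih =>
      rw [scanStr.eq_def]; simp [h1, h2]; omega

theorem scanPlain_rest_le : ∀ (l : List Char), (scanPlain l).2.length ≤ l.length := by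
  intro l
  induction l using scanPlain.induct with
  | case1 => simp [scanPlain]
  | case2 rest => simp [scanPlain]
  | case3 c rest h ih => rw [scanPlain.eq_def]; simp [h]; omega

-- B's outer loop: alternating (isString, segment) list.
def segments : List Char → List (Bool × List Char)
  | [] => []
  | c :: rest =>
    if c = '"' then
      let p := scanStr rest
      (true, c :: p.1) :: segments p.2
    else
      let p := scanPlain rest
      (false, c :: p.1) :: segments p.2
termination_by l => l.length
decreasing_by
  · exact Nat.lt_succ_of_le (scanStr_rest_le rest)
  · exact Nat.lt_succ_of_le (scanPlain_rest_le rest)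

-- B's renderer for a plain (non-string) segment: drop whitespace, space after ':'/','
-- via the need_space flag; returns the emitted text and the outgoing flag.
def renderSeg : List Char → Bool → List Char × Bool
  | [], ns => ([], ns)
  | c :: rest, ns =>
    if c = ' ' ∨ c = '\t' ∨ c = '\n' ∨ c = '\r' then renderSeg rest ns
    else if c = ':' ∨ c = ',' then
      let p := renderSeg rest true; (c :: p.1, p.2)
    else if c = '}' ∨ c = ']' then
      let p := renderSeg rest false; (c :: p.1, p.2)
    else
      let p := renderSeg rest false; ((if ns then [' ', c] else [c]) ++ p.1, p.2)

-- B's renderer over the segment list (string segments are emitted verbatim).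
def render : List (Bool × List Char) → Bool → List Char
  | [], _ => []
  | (true, seg) :: rest, ns => (if ns then ' ' :: seg else seg) ++ render rest false
  | (false, seg) :: rest, ns =>
    let p := renderSeg seg ns
    p.1 ++ render rest p.2

def compact_json_string_alt (pretty_json : String) : String :=
  String.ofList (render (segments pretty_json.toList) false)

-- ===== PRECONDITION & SPEC =====
def Spec_compact_json_string (pretty_json : String) (out : String) : Prop := out = compact_json_string_alt pretty_json
instance (pretty_json : String) (out : String) : Decidable (Spec_compact_json_string pretty_json out) := by unfold Spec_compact_json_string; infer_instance

-- ===== CLAIM (what is proved, stated in full; the proofs are below) =====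
def Claim_equal_compact_json_string : Prop := ∀ (pretty_json : String), Dom_compact_json_string pretty_json → Spec_compact_json_string pretty_json (compact_json_string pretty_json)

-- ===== LEMMAS AND PROOFS =====

-- Inside a string literal, A's loop emits exactly the scanned string segment and resumes
-- in non-string mode on the remainder, with need_space untouched.
theorem compactA_inStr (l : List Char) (ns : Bool) :
    compactA l true ns = (scanStr l).1 ++ compactA (scanStr l).2 false ns := by
  induction l using scanStr.induct generalizing ns with
  | case1 => simp [scanStr, compactA]
  | case2 rest => rw [scanStr.eq_def, compactA.eq_def]; simp
  | case3 d rest' h ih =>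
      rw [scanStr.eq_def, compactA.eq_def]
      simp [ih]
  | case4 h => rw [scanStr.eq_def, compactA.eq_def]; simp [compactA]
  | case5 c rest h1 h2 ih =>
      rw [scanStr.eq_def, compactA.eq_def]
      simp [h1, h2, ih]

-- Outside a string literal, A's loop on the plain prefix emits exactly B's rendering of the
-- scanned plain segment and resumes on the remainder with B's outgoing need_space flag.
theorem compactA_plain (l : List Char) (ns : Bool) :
    compactA l false ns
      = (renderSeg (scanPlain l).1 ns).1
        ++ compactA (scanPlain l).2 false (renderSeg (scanPlain l).1 ns).2 := by
  induction l using scanPlain.induct generalizing ns with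
  | case1 => simp [scanPlain, renderSeg, compactA]
  | case2 rest => rw [scanPlain.eq_def]; simp [renderSeg]
  | case3 c rest h ih =>
      have hsp : scanPlain (c :: rest) = (c :: (scanPlain rest).1, (scanPlain rest).2) := by
        rw [scanPlain.eq_def]; simp [h]
      rw [hsp, compactA.eq_def]
      by_cases hws : c = ' ' ∨ c = '\t' ∨ c = '\n' ∨ c = '\r'
      · simp [renderSeg, h, hws, ih]
      · by_cases hc : c = ':' ∨ c = ','
        · simp [renderSeg, h, hws, hc, ih]
        · by_cases hb : c = '}' ∨ c = ']'
          · simp [renderSeg, h, hws, hc, hb, ih]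
          · simp [renderSeg, h, hws, hc, hb, ih]
            split <;> simp

-- Main invariant: A's loop in non-string mode equals B's render of B's segments.
theorem compactA_eq_render (l : List Char) (ns : Bool) :
    compactA l false ns = render (segments l) ns := by
  induction l using segments.induct generalizing ns with
  | case1 => simp [segments, render, compactA]
  | case2 rest p ih =>
      rw [segments, compactA.eq_def]
      simp [render, compactA_inStr]
      split <;> (simp; exact ih false)
  | case3 c rest h p ih =>
      rw [segments]
      simp only [if_neg h, render]
      have hsp : scanPlain (c :: rest) = (c :: (scanPlain rest).1, (scanPlain rest).2) := by
        rw [scanPlain.eq_def]; simp [h]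
      have hmain := compactA_plain (c :: rest) ns
      rw [hsp] at hmain
      rw [hmain, ih]

-- ===== VERDICT (by name: the statement is the Claim_ definition above) =====
theorem compact_json_string_spec : Claim_equal_compact_json_string := by
  intro s _
  unfold Spec_compact_json_string compact_json_string compact_json_string_alt
  split
  · rename_i hs
    subst hs
    simp [segments, render, String.ofList_nil]
  · rw [compactA_eq_render]
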